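-- pv_equiv track=rewrite | github.com/faceless-truth/mcs-coworker | app.py | _seconds_to_schedule_label
-- ===== SOURCE A (Python) =====
-- SCHEDULE_OPTIONS = [
--     ("Manual", 0),
--     ("1 min", 60),
--     ("5 min", 300),
--     ("15 min", 900),
--     ("30 min", 1800),
--     ("1 hr", 3600),
--     ("4 hr", 14400),
--     ("24 hr", 86400),
-- ]
--
-- def _seconds_to_schedule_label(seconds: int) -> str:
--     """Convert schedule seconds to a dropdown label."""
--     for label, secs in SCHEDULE_OPTIONS:
--         if secs == seconds:
--             return label
--     if seconds <= 0:
--         return "Manual"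
--     if seconds < 3600:
--         return f"{seconds // 60} min"
--     return f"{seconds // 3600} hr"
-- ===== SOURCE B (Python) =====
-- def _seconds_to_schedule_label(seconds: int) -> str:
--     """Convert schedule seconds to a dropdown label (closed form, no table scan)."""
--     if seconds <= 0:
--         return "Manual"
--     if seconds < 3600:
--         return f"{seconds // 60} min"
--     return f"{seconds // 3600} hr"
-- ===== Notes on version B (the rewrite author's own statement) =====
-- stated objective: simpler
-- what changed: Dropped the SCHEDULE_OPTIONS table and its linear membership scan: every table label equals the arithmetic fallback's output, so B computes the label directly with the closed-form if-chain.
import Mathlib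
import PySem

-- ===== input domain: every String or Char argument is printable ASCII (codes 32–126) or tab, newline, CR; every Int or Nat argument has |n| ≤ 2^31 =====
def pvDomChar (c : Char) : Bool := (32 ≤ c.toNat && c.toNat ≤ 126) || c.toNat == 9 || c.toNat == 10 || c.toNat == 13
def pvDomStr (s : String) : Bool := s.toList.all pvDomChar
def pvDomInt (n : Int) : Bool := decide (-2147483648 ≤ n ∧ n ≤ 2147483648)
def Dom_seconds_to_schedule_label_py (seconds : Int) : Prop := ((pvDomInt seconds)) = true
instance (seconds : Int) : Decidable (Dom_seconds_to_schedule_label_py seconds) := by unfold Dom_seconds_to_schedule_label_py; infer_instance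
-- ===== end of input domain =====

-- B replaces A's SCHEDULE_OPTIONS table scan with the equivalent closed-form label arithmetic (simpler).


-- ===== PORT A =====
def SCHEDULE_OPTIONS : List (String × Int) :=
  [("Manual", 0), ("1 min", 60), ("5 min", 300), ("15 min", 900),
   ("30 min", 1800), ("1 hr", 3600), ("4 hr", 14400), ("24 hr", 86400)]

-- the 'for label, secs in SCHEDULE_OPTIONS: if secs == seconds: return label' loop
def scheduleLoop : List (String × Int) → Int → Option String
  | [], _ => none
  | (label, secs) :: rest, seconds =>
      if secs = seconds then some label else scheduleLoop rest seconds

def seconds_to_schedule_label_py (seconds : Int) : String :=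
  match scheduleLoop SCHEDULE_OPTIONS seconds with
  | some label => label
  | none =>
      if seconds ≤ 0 then "Manual"
      else if seconds < 3600 then PySem.Int.toStr (PySem.Int.floordiv seconds 60) ++ " min"
      else PySem.Int.toStr (PySem.Int.floordiv seconds 3600) ++ " hr"

-- ===== PORT B =====
def seconds_to_schedule_label_py_alt (seconds : Int) : String :=
  if seconds ≤ 0 then "Manual"
  else if seconds < 3600 then PySem.Int.toStr (PySem.Int.floordiv seconds 60) ++ " min"
  else PySem.Int.toStr (PySem.Int.floordiv seconds 3600) ++ " hr"

-- ===== PRECONDITION & SPEC =====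
def Spec_seconds_to_schedule_label_py (seconds : Int) (out : String) : Prop := out = seconds_to_schedule_label_py_alt seconds
instance (seconds : Int) (out : String) : Decidable (Spec_seconds_to_schedule_label_py seconds out) := by unfold Spec_seconds_to_schedule_label_py; infer_instance

-- ===== CLAIM (what is proved, stated in full; the proofs are below) =====
def Claim_equal_seconds_to_schedule_label_py : Prop := ∀ (seconds : Int), Dom_seconds_to_schedule_label_py seconds → Spec_seconds_to_schedule_label_py seconds (seconds_to_schedule_label_py seconds)

-- ===== LEMMAS AND PROOFS =====

-- ===== VERDICT (by name: the statement is the Claim_ definition above) =====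
theorem seconds_to_schedule_label_py_spec : Claim_equal_seconds_to_schedule_label_py := by
  intro seconds _
  show seconds_to_schedule_label_py seconds = seconds_to_schedule_label_py_alt seconds
  by_cases h0 : seconds = 0; · subst h0; decide
  by_cases h1 : seconds = 60; · subst h1; decide
  by_cases h2 : seconds = 300; · subst h2; decide
  by_cases h3 : seconds = 900; · subst h3; decide
  by_cases h4 : seconds = 1800; · subst h4; decide
  by_cases h5 : seconds = 3600; · subst h5; decide
  by_cases h6 : seconds = 14400; · subst h6; decide
  by_cases h7 : seconds = 86400; · subst h7; decide
  -- no table entry matches: A falls through to the same arithmetic B uses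
  simp [seconds_to_schedule_label_py, seconds_to_schedule_label_py_alt, SCHEDULE_OPTIONS,
        scheduleLoop, Ne.symm h0, Ne.symm h1, Ne.symm h2, Ne.symm h3, Ne.symm h4,
        Ne.symm h5, Ne.symm h6, Ne.symm h7]
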